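-- pv_equiv track=rewrite | github.com/viniciusmagnos/app-balanco-massa | backend/app/core/segments.py | _sort_and_merge_groups
-- ===== SOURCE A (Python) =====
-- def _sort_and_merge_groups(groups):
--     if not groups:
--         return []
--     sorted_groups = sorted(groups, key=lambda g: g[0][0])
--
--     chains = []
--     if not sorted_groups:
--         return chains
--
--     current_chain = []
--
--     def append_to_chain(chain, points):
--         for p in points:
--             if not chain or chain[-1] != p:
--                 chain.append(p)
--
--     append_to_chain(current_chain, sorted_groups[0])
--
--     for g in sorted_groups[1:]:
--         if not g:
--             continue
--         if current_chain and current_chain[-1] == g[0]: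
--             append_to_chain(current_chain, g)
--         else:
--             if current_chain:
--                 chains.append(current_chain)
--             current_chain = []
--             append_to_chain(current_chain, g)
--
--     if current_chain:
--         chains.append(current_chain)
--
--     return chains
-- ===== SOURCE B (Python) =====
-- def _sort_and_merge_groups(groups):
--     if not groups:
--         return []
--     sorted_groups = sorted(groups, key=lambda g: g[0][0])
--
--     # pass 1: partition the sorted groups into runs of chained groups
--     runs = [[sorted_groups[0]]]
--     for g in sorted_groups[1:]:
--         if runs[-1][-1][-1] == g[0]:
--             runs[-1].append(g)
--         else:
--             runs.append([g])
--
--     # pass 2: flatten each run, dropping consecutive duplicate points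
--     return [_dedup([p for g in run for p in g]) for run in runs]
--
--
-- def _dedup(points):
--     out = []
--     prev = None
--     for p in points:
--         if p != prev:
--             out.append(p)
--             prev = p
--     return out
-- ===== Notes on version B (the rewrite author's own statement) =====
-- stated objective: alternative
-- what changed: Replaces A's single stateful loop (mutable current_chain with in-place dedup appends and flush-on-break) by a two-pass decomposition: first partition the sorted groups into runs of chained groups, then flatten each run with one prev-carrying consecutive-dedup pass.
import Mathlib
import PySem

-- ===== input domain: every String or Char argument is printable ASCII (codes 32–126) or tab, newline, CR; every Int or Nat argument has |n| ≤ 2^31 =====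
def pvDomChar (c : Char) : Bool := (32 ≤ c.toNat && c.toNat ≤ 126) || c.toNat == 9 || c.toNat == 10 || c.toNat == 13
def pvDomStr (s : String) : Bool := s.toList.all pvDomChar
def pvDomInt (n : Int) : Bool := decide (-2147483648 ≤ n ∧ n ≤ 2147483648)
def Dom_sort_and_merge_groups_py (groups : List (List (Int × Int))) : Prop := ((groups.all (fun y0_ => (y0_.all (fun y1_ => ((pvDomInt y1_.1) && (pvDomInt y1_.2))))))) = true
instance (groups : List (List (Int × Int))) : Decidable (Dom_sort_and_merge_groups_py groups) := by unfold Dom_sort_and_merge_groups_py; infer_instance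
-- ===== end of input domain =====

-- B re-decomposes A's single stateful merge loop into two passes (partition sorted groups into
-- runs, then flatten each run with a prev-carrying consecutive dedup); same cost, equal output.

-- ===== PORT A =====
-- Python's nested append_to_chain: append each point unless it equals the chain's last element
def pvAppendToChain (chain : List (Int × Int)) (points : List (Int × Int)) : List (Int × Int) :=
  points.foldl (fun c p => if c = [] ∨ c.getLast? ≠ some p then c ++ [p] else c) chain

-- one iteration of A's loop over sorted_groups[1:]; state = (chains, current_chain)
def pvAStep (st : List (List (Int × Int)) × List (Int × Int)) (g : List (Int × Int)) :
    List (List (Int × Int)) × List (Int × Int) :=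
  if g = [] then st
  else if st.2 ≠ [] ∧ st.2.getLast? = g.head? then (st.1, pvAppendToChain st.2 g)
  else ((if st.2 ≠ [] then st.1 ++ [st.2] else st.1), pvAppendToChain [] g)

-- the sort key g[0][0] raises IndexError on an empty group (excluded by Pre_); headD makes it total
def sort_and_merge_groups_py (groups : List (List (Int × Int))) : List (List (Int × Int)) :=
  if groups = [] then []
  else
    match PySem.List.sorted groups (fun g => (g.headD (0, 0)).1) with
    | [] => []
    | g0 :: rest =>
      let st := rest.foldl pvAStep ([], pvAppendToChain [] g0)
      if st.2 ≠ [] then st.1 ++ [st.2] else st.1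

-- ===== PORT B =====
-- B's _dedup: drop points equal to the carried previous point
def pvDedup (points : List (Int × Int)) : List (Int × Int) :=
  (points.foldl
    (fun (st : List (Int × Int) × Option (Int × Int)) p =>
      if some p ≠ st.2 then (st.1 ++ [p], some p) else st)
    ([], none)).1

-- one iteration of B's run-partition loop: extend the last run iff g[0] chains onto its last point
def pvRunStep (runs : List (List (List (Int × Int)))) (g : List (Int × Int)) :
    List (List (List (Int × Int))) :=
  if ((runs.getLastD []).getLastD []).getLast? = g.head? then
    runs.dropLast ++ [runs.getLastD [] ++ [g]]
  else runs ++ [[g]]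

def sort_and_merge_groups_py_alt (groups : List (List (Int × Int))) : List (List (Int × Int)) :=
  if groups = [] then []
  else
    match PySem.List.sorted groups (fun g => (g.headD (0, 0)).1) with
    | [] => []
    | g0 :: rest =>
      (rest.foldl pvRunStep [[g0]]).map (fun run => pvDedup run.flatten)

-- ===== PRECONDITION & SPEC =====
-- Pre_ excludes inputs with an empty group: there the sort key g[0][0] raises IndexError in A (and in B).
def Pre_sort_and_merge_groups_py (groups : List (List (Int × Int))) : Prop :=
  ∀ g ∈ groups, g ≠ ([] : List (Int × Int))
instance (groups : List (List (Int × Int))) : Decidable (Pre_sort_and_merge_groups_py groups) := by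
  unfold Pre_sort_and_merge_groups_py; infer_instance
def pvWitness_sort_and_merge_groups_py : (List (List (Int × Int))) :=
  [[(1, 1), (2, 2)], [(0, 0), (1, 1)]]
def Spec_sort_and_merge_groups_py (groups : List (List (Int × Int))) (out : List (List (Int × Int))) : Prop := out = sort_and_merge_groups_py_alt groups
instance (groups : List (List (Int × Int))) (out : List (List (Int × Int))) : Decidable (Spec_sort_and_merge_groups_py groups out) := by unfold Spec_sort_and_merge_groups_py; infer_instance

-- ===== CLAIM (what is proved, stated in full; the proofs are below) =====
def Claim_equal_sort_and_merge_groups_py : Prop := ∀ (groups : List (List (Int × Int))), Dom_sort_and_merge_groups_py groups → Pre_sort_and_merge_groups_py groups → Spec_sort_and_merge_groups_py groups (sort_and_merge_groups_py groups)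

-- ===== LEMMAS AND PROOFS =====

-- reference dedup: recursion carrying the previous point
def pvDD (prev : Option (Int × Int)) : List (Int × Int) → List (Int × Int)
  | [] => []
  | p :: ps => if some p = prev then pvDD prev ps else p :: pvDD (some p) ps

theorem pvGetLast?_cons_ne (a : Int × Int) (l : List (Int × Int)) (h : l ≠ []) :
    (a :: l).getLast? = l.getLast? := by
  rw [show a :: l = [a] ++ l from rfl, List.getLast?_append_of_ne_nil [a] h]

theorem pvGetLast?_cons_ne' (a : List (Int × Int)) (l : List (List (Int × Int)))
    (h : l ≠ []) : (a :: l).getLast? = l.getLast? := by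
  rw [show a :: l = [a] ++ l from rfl, List.getLast?_append_of_ne_nil [a] h]

theorem pvFlatten_ne_nil (run : List (List (Int × Int))) (hall : ∀ g ∈ run, g ≠ [])
    (hne : run ≠ []) : run.flatten ≠ [] := by
  intro hc
  rw [List.flatten_eq_nil_iff] at hc
  rcases List.exists_cons_of_ne_nil hne with ⟨g1, rs', rfl⟩
  exact (hall g1 (by simp)) (hc g1 (by simp))

theorem pvAppendToChain_eq (points : List (Int × Int)) :
    ∀ chain, pvAppendToChain chain points = chain ++ pvDD chain.getLast? points := by
  induction points with
  | nil => intro chain; simp [pvAppendToChain, pvDD]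
  | cons p ps ih =>
    intro chain
    by_cases h : chain.getLast? = some p
    · have hne : chain ≠ [] := by
        intro hc; rw [hc] at h; simp at h
      have : pvAppendToChain chain (p :: ps) = pvAppendToChain chain ps := by
        simp [pvAppendToChain, List.foldl_cons, hne, h]
      rw [this, ih chain, h]
      simp [pvDD]
    · have : pvAppendToChain chain (p :: ps) = pvAppendToChain (chain ++ [p]) ps := by
        by_cases hc : chain = [] <;> simp [pvAppendToChain, List.foldl_cons, hc, h]
      rw [this, ih (chain ++ [p])]
      have h2 : (chain ++ [p]).getLast? = some p := List.getLast?_concat ..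
      rw [h2]
      have hne : ¬ (some p = chain.getLast?) := fun hh => h hh.symm
      rw [show pvDD chain.getLast? (p :: ps) = p :: pvDD (some p) ps by simp [pvDD, hne]]
      simp

theorem pvDedup_aux (points : List (Int × Int)) :
    ∀ out prev,
      (points.foldl
        (fun (st : List (Int × Int) × Option (Int × Int)) p =>
          if some p ≠ st.2 then (st.1 ++ [p], some p) else st) (out, prev)).1
      = out ++ pvDD prev points := by
  induction points with
  | nil => intro out prev; simp [pvDD]
  | cons p ps ih =>
    intro out prev
    rw [List.foldl_cons]
    by_cases h : some p = prev
    · rw [show (if some p ≠ ((out, prev) : List (Int × Int) × Option (Int × Int)).2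
          then ((out, prev).1 ++ [p], some p) else (out, prev)) = (out, prev) by simp [h]]
      rw [ih out prev, show pvDD prev (p :: ps) = pvDD prev ps by simp [pvDD, h]]
    · rw [show (if some p ≠ ((out, prev) : List (Int × Int) × Option (Int × Int)).2
          then ((out, prev).1 ++ [p], some p) else (out, prev)) = (out ++ [p], some p) by simp [h]]
      rw [ih (out ++ [p]) (some p), show pvDD prev (p :: ps) = p :: pvDD (some p) ps by
        simp [pvDD, h]]
      simp

theorem pvDedup_eq (points : List (Int × Int)) : pvDedup points = pvDD none points := by
  simpa [pvDedup] using pvDedup_aux points [] none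

theorem pvDD_none_cons (p : Int × Int) (ps : List (Int × Int)) :
    pvDD none (p :: ps) = p :: pvDD (some p) ps := by simp [pvDD]

theorem getLast?_append_pvDD (pts : List (Int × Int)) :
    ∀ c, pts ≠ [] → (c ++ pvDD c.getLast? pts).getLast? = pts.getLast? := by
  induction pts with
  | nil => intro c h; exact absurd rfl h
  | cons p ps ih =>
    intro c _
    by_cases h : some p = c.getLast?
    · rcases eq_or_ne ps [] with hps | hps
      · subst hps
        rw [show pvDD c.getLast? [p] = [] by simp [pvDD, h]]
        simp [← h]
      · rw [show pvDD c.getLast? (p :: ps) = pvDD c.getLast? ps by simp [pvDD, h]]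
        rw [ih c hps]
        rw [pvGetLast?_cons_ne p ps hps]
    · rw [show pvDD c.getLast? (p :: ps) = p :: pvDD (some p) ps by simp [pvDD, h]]
      rw [show c ++ p :: pvDD (some p) ps = (c ++ [p]) ++ pvDD (c ++ [p]).getLast? ps by
        simp]
      rcases eq_or_ne ps [] with hps | hps
      · subst hps; simp [pvDD]
      · rw [ih (c ++ [p]) hps]
        rw [pvGetLast?_cons_ne p ps hps]

theorem pvDD_append (as : List (Int × Int)) :
    ∀ prev bs, pvDD prev (as ++ bs) = pvDD prev as ++ pvDD (as.getLast?.or prev) bs := by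
  induction as with
  | nil => intro prev bs; simp [pvDD]
  | cons a as ih =>
    intro prev bs
    by_cases h : some a = prev
    · rw [List.cons_append, show pvDD prev (a :: (as ++ bs)) = pvDD prev (as ++ bs) by
        simp [pvDD, h]]
      rw [ih prev bs]
      have hl : (a :: as).getLast?.or prev = as.getLast?.or prev := by
        rcases eq_or_ne as [] with has | has
        · subst has; simp [← h]
        · rw [pvGetLast?_cons_ne a as has]
      rw [show pvDD prev (a :: as) = pvDD prev as by simp [pvDD, h], hl]
    · rw [List.cons_append, show pvDD prev (a :: (as ++ bs)) = a :: pvDD (some a) (as ++ bs) by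
        simp [pvDD, h]]
      rw [ih (some a) bs]
      have hl : (a :: as).getLast?.or prev = as.getLast?.or (some a) := by
        rcases eq_or_ne as [] with has | has
        · subst has; simp
        · rw [pvGetLast?_cons_ne a as has]
          rcases List.exists_cons_of_ne_nil has with ⟨b, bs, rfl⟩
          simp [List.getLast?_cons]
      rw [show pvDD prev (a :: as) = a :: pvDD (some a) as by simp [pvDD, h], hl]
      simp

theorem flatten_getLast? (run : List (List (Int × Int))) :
    (∀ g ∈ run, g ≠ []) → run ≠ [] →
    run.flatten.getLast? = (run.getLast?.getD []).getLast? := by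
  induction run with
  | nil => intro _ h; exact absurd rfl h
  | cons g rs ih =>
    intro hall _
    rcases eq_or_ne rs [] with hrs | hrs
    · subst hrs; simp
    · have hflat : rs.flatten ≠ [] :=
        pvFlatten_ne_nil rs (fun x hx => hall x (by simp [hx])) hrs
      rw [List.flatten_cons, List.getLast?_append_of_ne_nil g hflat,
        ih (fun x hx => hall x (by simp [hx])) hrs,
        show (g :: rs).getLast? = rs.getLast? from pvGetLast?_cons_ne' g rs hrs]

theorem foldl_pvRunStep_pull (rest : List (List (Int × Int))) :
    ∀ (runs0 : List (List (List (Int × Int)))) (run : List (List (Int × Int))), run ≠ [] →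
      rest.foldl pvRunStep (runs0 ++ [run]) = runs0 ++ rest.foldl pvRunStep [run] := by
  induction rest with
  | nil => intro runs0 run _; simp
  | cons g rest ih =>
    intro runs0 run hrun
    have hdrop : (runs0 ++ [run]).dropLast = runs0 := List.dropLast_concat ..
    by_cases h : ((run.getLast?.getD []).getLast? = g.head?)
    · have h1 : pvRunStep (runs0 ++ [run]) g = runs0 ++ [run ++ [g]] := by
        simp [pvRunStep, List.getLastD_eq_getLast?, hdrop, h]
      have h2 : pvRunStep [run] g = [run ++ [g]] := by
        simp [pvRunStep, List.getLastD_eq_getLast?, h]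
      rw [List.foldl_cons, h1, ih runs0 (run ++ [g]) (by simp), List.foldl_cons, h2]
    · have h1 : pvRunStep (runs0 ++ [run]) g = (runs0 ++ [run]) ++ [[g]] := by
        simp [pvRunStep, List.getLastD_eq_getLast?, h]
      have h2 : pvRunStep [run] g = [run] ++ [[g]] := by
        simp [pvRunStep, List.getLastD_eq_getLast?, h]
      rw [List.foldl_cons, h1, ih (runs0 ++ [run]) [g] (by simp), List.foldl_cons, h2,
        ih [run] [g] (by simp)]
      simp

theorem pvMain (rest : List (List (Int × Int))) :
    ∀ (chains : List (List (Int × Int))) (run : List (List (Int × Int))),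
      (∀ g ∈ rest, g ≠ []) → run ≠ [] → (∀ g ∈ run, g ≠ []) →
      (let st := rest.foldl pvAStep (chains, pvDD none run.flatten);
       if st.2 ≠ [] then st.1 ++ [st.2] else st.1)
      = chains ++ (rest.foldl pvRunStep [run]).map (fun r => pvDedup r.flatten) := by
  induction rest with
  | nil =>
    intro chains run _ hrun hall
    have hflat : run.flatten ≠ [] := pvFlatten_ne_nil run hall hrun
    rcases List.exists_cons_of_ne_nil hflat with ⟨p, ps, hps⟩
    simp only [List.foldl_nil, List.map_cons, List.map_nil, pvDedup_eq]
    rw [hps, pvDD_none_cons]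
    simp
  | cons g rest ih =>
    intro chains run hrest hrun hall
    have hg : g ≠ [] := hrest g (by simp)
    have hrest' : ∀ x ∈ rest, x ≠ [] := fun x hx => hrest x (by simp [hx])
    have hflat : run.flatten ≠ [] := pvFlatten_ne_nil run hall hrun
    have hcur : pvDD none run.flatten ≠ [] := by
      rcases List.exists_cons_of_ne_nil hflat with ⟨p, ps, hps⟩
      rw [hps, pvDD_none_cons]; simp
    have hcurlast : (pvDD none run.flatten).getLast? = run.flatten.getLast? := by
      have := getLast?_append_pvDD run.flatten ([]) hflat
      simpa using this
    have hcond : ((pvDD none run.flatten).getLast? = g.head?)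
        ↔ ((run.getLast?.getD []).getLast? = g.head?) := by
      rw [hcurlast, flatten_getLast? run hall hrun]
    by_cases h : ((run.getLast?.getD []).getLast? = g.head?)
    · -- chained: extend current chain / current run
      have hstep : pvAStep (chains, pvDD none run.flatten) g
          = (chains, pvDD none ((run ++ [g]).flatten)) := by
        have hc : (pvDD none run.flatten).getLast? = g.head? := hcond.mpr h
        have : pvAppendToChain (pvDD none run.flatten) g
            = pvDD none (run.flatten ++ g) := by
          rw [pvAppendToChain_eq, pvDD_append]
          have : run.flatten.getLast?.or none = (pvDD none run.flatten).getLast? := by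
            rw [hcurlast]
            rcases List.exists_cons_of_ne_nil hflat with ⟨p, ps, hps⟩
            rw [hps]; simp [List.getLast?_cons]
          rw [this]
        simp [pvAStep, hg, hcur, hc, this]
      have hrstep : pvRunStep [run] g = [run ++ [g]] := by
        simp [pvRunStep, List.getLastD_eq_getLast?, h]
      rw [List.foldl_cons, hstep, List.foldl_cons, hrstep]
      exact ih chains (run ++ [g]) hrest' (by simp)
        (fun x hx => by
          rcases List.mem_append.mp hx with hx | hx
          · exact hall x hx
          · simpa using (by simpa using hx : x = g) ▸ hg)
    · -- break: flush current chain / start a new run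
      have hstep : pvAStep (chains, pvDD none run.flatten) g
          = (chains ++ [pvDD none run.flatten], pvDD none ([g] : List (List (Int × Int))).flatten) := by
        have hc : ¬ ((pvDD none run.flatten).getLast? = g.head?) := fun hh => h (hcond.mp hh)
        simp [pvAStep, hg, hcur, hc, pvAppendToChain_eq]
      have hrstep : pvRunStep [run] g = [run] ++ [[g]] := by
        simp [pvRunStep, List.getLastD_eq_getLast?, h]
      rw [List.foldl_cons, hstep, List.foldl_cons, hrstep]
      rw [foldl_pvRunStep_pull rest [run] [g] (by simp)]
      rw [ih (chains ++ [pvDD none run.flatten]) [g] hrest' (by simp)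
        (by intro x hx; simpa using (by simpa using hx : x = g) ▸ hg)]
      simp [pvDedup_eq]

-- ===== VERDICT (by name: the statement is the Claim_ definition above) =====
theorem sort_and_merge_groups_py_spec : Claim_equal_sort_and_merge_groups_py := by
  intro groups _ hpre
  unfold Spec_sort_and_merge_groups_py
  unfold sort_and_merge_groups_py sort_and_merge_groups_py_alt
  by_cases hg : groups = []
  · simp [hg]
  · rw [if_neg hg, if_neg hg]
    rcases hs : PySem.List.sorted groups (fun g => (g.headD (0, 0)).1) with _ | ⟨g0, rest⟩
    · rfl
    · have hmem : ∀ x ∈ g0 :: rest, x ≠ [] := by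
        intro x hx
        apply hpre
        have := (PySem.List.mem_sorted groups
          (fun g => (g.headD (0, 0)).1) false x).mp
        rw [hs] at this
        exact this hx
      have h0 : pvAppendToChain [] g0 = pvDD none (([g0] : List (List (Int × Int))).flatten) := by
        simp [pvAppendToChain_eq]
      show (have st := List.foldl pvAStep ([], pvAppendToChain [] g0) rest;
            if st.2 ≠ [] then st.1 ++ [st.2] else st.1)
          = List.map (fun run => pvDedup run.flatten) (List.foldl pvRunStep [[g0]] rest)
      rw [h0]
      have := pvMain rest [] [g0]
        (fun x hx => hmem x (by simp [hx])) (by simp)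
        (by intro x hx; simpa using (by simpa using hx : x = g0) ▸ hmem g0 (by simp))
      simpa using this
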